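-- pv_equiv track=rewrite | github.com/WilliamZhang9/waterloo_ccc | Senior/2019/Q2_Pretty_Average_Primes_v3.py | findPrimePair
-- ===== SOURCE A (Python) =====
-- def isPrimeFuc(num):
-- 	if num == 2:
-- 		return True
--
-- 	elif num == 1 or num == 0 or num%2 == 0:
-- 		return False
-- 	for count in range(3, int(num/2)+1, 2):
-- 		if (num%count) == 0:
-- 			return False
-- 	return True
--
-- def findPrimePair(number):
--     result = ""
--     for i in range(number, 2, -1):
--         if isPrimeFuc(i):
--             pairNum = number*2 - i
--             if isPrimeFuc(pairNum):
--                 result = str(i) + ' ' + str(pairNum)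
--                 break
--     return result
--
-- result = []
-- ===== SOURCE B (Python) =====
-- def _is_prime(n):
--     if n < 2:
--         return False
--     if n % 2 == 0:
--         return n == 2
--     d = 3
--     while d * d <= n:
--         if n % d == 0:
--             return False
--         d += 2
--     return True
--
-- def findPrimePair(number):
--     target = 2 * number
--     for p in range(number, target - 2):
--         q = target - p
--         if _is_prime(p) and _is_prime(q):
--             return str(q) + ' ' + str(p)
--     return ""
-- ===== Notes on version B (the rewrite author's own statement) =====
-- stated objective: faster
-- what changed: Primality is tested by trial division only up to sqrt(n) (odd divisors, while d*d<=n) instead of up to n/2, and the search walks the pair sums upward (p, 2n-p) with a single combined check instead of counting the first member down with nested ifs.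
import Mathlib
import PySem

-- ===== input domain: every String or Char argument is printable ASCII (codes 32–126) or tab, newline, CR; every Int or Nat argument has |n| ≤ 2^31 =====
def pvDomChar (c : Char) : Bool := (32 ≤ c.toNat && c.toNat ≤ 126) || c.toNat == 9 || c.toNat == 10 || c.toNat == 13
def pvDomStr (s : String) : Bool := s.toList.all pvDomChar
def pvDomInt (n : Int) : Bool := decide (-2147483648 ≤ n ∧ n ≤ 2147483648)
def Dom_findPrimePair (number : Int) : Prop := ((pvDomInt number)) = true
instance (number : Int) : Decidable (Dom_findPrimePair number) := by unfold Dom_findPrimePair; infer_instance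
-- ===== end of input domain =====

-- B replaces A's trial division up to num/2 by trial division up to sqrt(num) and walks the
-- pair sums upward instead of the first members downward; same result, asymptotically faster
-- primality test (measured faster in a timing run).

-- ===== PORT A =====
-- for count in range(3, int(num/2)+1, 2): …  (int(num/2) = num / 2 here: every call from
-- findPrimePair has num ≥ 3, where Python's float-truncation division agrees with Int division)
def isPrimeFucLoop (num : Int) : List Int → Bool
  | [] => true
  | c :: rest => if PySem.Int.mod num c == 0 then false else isPrimeFucLoop num rest

def isPrimeFuc (num : Int) : Bool :=
  if num == 2 then true
  else if num == 1 || num == 0 || PySem.Int.mod num 2 == 0 then false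
  else isPrimeFucLoop num (PySem.List.pyRange 3 (num / 2 + 1) 2)

-- for i in range(number, 2, -1): …  with break → early return of the result string
def findPrimePairLoop (number : Int) : List Int → String
  | [] => ""
  | i :: rest =>
    if isPrimeFuc i then
      if isPrimeFuc (number * 2 - i) then
        PySem.Int.toStr i ++ " " ++ PySem.Int.toStr (number * 2 - i)
      else findPrimePairLoop number rest
    else findPrimePairLoop number rest

def findPrimePair (number : Int) : String :=
  findPrimePairLoop number (PySem.List.pyRange number 2 (-1))

-- ===== PORT B =====
-- while d * d <= n: …  (d starts at 3, increases by 2; the Nat fuel only makes the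
-- loop total — with the fuel altIsPrime supplies, it is never exhausted)
def altTrialDiv (n : Int) : Int → Nat → Bool
  | _, 0 => true
  | d, fuel + 1 =>
    if d * d ≤ n then
      if PySem.Int.mod n d == 0 then false else altTrialDiv n (d + 2) fuel
    else true

def altIsPrime (n : Int) : Bool :=
  if n < 2 then false
  else if PySem.Int.mod n 2 == 0 then n == 2
  else altTrialDiv n 3 (n + 1).toNat

-- for p in range(number, target - 2): …  with early return
def altSearch (target : Int) : List Int → String
  | [] => ""
  | p :: rest =>
    if altIsPrime p && altIsPrime (target - p) then
      PySem.Int.toStr (target - p) ++ " " ++ PySem.Int.toStr p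
    else altSearch target rest

def findPrimePair_alt (number : Int) : String :=
  altSearch (2 * number) (PySem.List.pyRange number (2 * number - 2) 1)

-- ===== PRECONDITION & SPEC =====
def Spec_findPrimePair (number : Int) (out : String) : Prop := out = findPrimePair_alt number
instance (number : Int) (out : String) : Decidable (Spec_findPrimePair number out) := by unfold Spec_findPrimePair; infer_instance

-- ===== CLAIM (what is proved, stated in full; the proofs are below) =====
def Claim_equal_findPrimePair : Prop := ∀ (number : Int), Dom_findPrimePair number → Spec_findPrimePair number (findPrimePair number)

-- ===== LEMMAS AND PROOFS =====

-- A's loop is an all-check over its divisor list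
theorem isPrimeFucLoop_iff (num : Int) (l : List Int) :
    isPrimeFucLoop num l = true ↔ ∀ c ∈ l, ¬(PySem.Int.mod num c = 0) := by
  induction l with
  | nil => simp [isPrimeFucLoop]
  | cons c rest ih =>
    simp only [isPrimeFucLoop, List.mem_cons]
    split_ifs with h
    · simp only [beq_iff_eq] at h
      constructor
      · intro hfalse; cases hfalse
      · intro hall; exact absurd h (hall c (Or.inl rfl))
    · simp only [beq_iff_eq] at h
      rw [ih]
      constructor
      · rintro hall e (rfl | he)
        · exact h
        · exact hall e he
      · intro hall e he; exact hall e (Or.inr he)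

-- B's while-loop checked all odd candidates e ≥ d with e*e ≤ n (fuel large enough)
theorem altTrialDiv_le_self (e : Int) (he : 0 ≤ e) : e ≤ e * e := by
  by_cases h1 : 1 ≤ e
  · have := mul_le_mul_of_nonneg_left h1 he
    omega
  · have he0 : e = 0 := by omega
    subst he0
    norm_num

theorem altTrialDiv_iff (n : Int) (fuel : Nat) :
    ∀ d : Int, 0 ≤ d → (n + 1 - d).toNat ≤ 2 * fuel →
      (altTrialDiv n d fuel = true ↔
        ∀ e : Int, d ≤ e → e * e ≤ n → (2 ∣ e - d) → ¬(PySem.Int.mod n e = 0)) := by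
  induction fuel with
  | zero =>
    intro d hd hfuel
    simp only [altTrialDiv, true_iff]
    intro e hde hen _
    have := altTrialDiv_le_self e (by omega)
    omega
  | succ fuel ih =>
    intro d hd hfuel
    show (if d * d ≤ n then _ else _) = true ↔ _
    split_ifs with h1 h2
    · simp only [Bool.false_eq_true, false_iff]
      intro hall
      exact hall d (le_refl d) h1 (by omega) (by simpa using h2)
    · rw [ih (d + 2) (by omega) (by omega)]
      constructor
      · intro hall e hde hen h2e
        rcases eq_or_lt_of_le hde with rfl | hlt
        · simpa using h2
        · exact hall e (by omega) hen (by omega)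
      · intro hall e hde hen h2e
        exact hall e (by omega) hen (by omega)
    · simp only [true_iff]
      intro e hde hen _
      exfalso
      have : d * d ≤ e * e := mul_le_mul hde hde hd (le_trans hd hde)
      omega

theorem mod_pos_eq_zero_iff (n c : Int) (hc : 0 < c) :
    PySem.Int.mod n c = 0 ↔ c ∣ n := by
  unfold PySem.Int.mod
  rw [Int.fmod_eq_emod]
  rw [if_pos (Or.inl (le_of_lt hc)), add_zero]
  exact Iff.symm Int.dvd_iff_emod_eq_zero

-- the two search bounds find the same composites: a divisor in [3, n/2] exists iff one with e*e ≤ n does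
theorem divisor_bridge (n : Int) (hn : 3 ≤ n) (hodd : ¬(2 ∣ n)) :
    (∃ c : Int, 3 ≤ c ∧ c < n / 2 + 1 ∧ 2 ∣ c - 3 ∧ c ∣ n) ↔
    (∃ e : Int, 3 ≤ e ∧ e * e ≤ n ∧ 2 ∣ e - 3 ∧ e ∣ n) := by
  constructor
  · rintro ⟨c, hc3, hcU, _hcodd, hcd⟩
    have hc0 : 0 < c := by omega
    have h2c : 2 * c ≤ n := by omega
    obtain ⟨k, hk⟩ := hcd
    have hcd : c ∣ n := ⟨k, hk⟩
    have hkdiv : n / c = k := by rw [hk]; exact Int.mul_ediv_cancel_left k (by omega)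
    have hq : n / c ∣ n := by rw [hkdiv, hk]; exact ⟨c, by ring⟩
    have hqc : (n / c) * c = n := by rw [hkdiv, hk]; ring
    have hq2 : 2 ≤ n / c := by
      rw [Int.le_ediv_iff_mul_le hc0]; omega
    have hqodd : ¬(2 ∣ n / c) := fun h => hodd (h.trans hq)
    have hq3 : 3 ≤ n / c := by omega
    refine ⟨min c (n / c), le_min hc3 hq3, ?_, ?_, ?_⟩
    · calc min c (n / c) * min c (n / c) ≤ (n / c) * c := by
            apply mul_le_mul (min_le_right _ _) (min_le_left _ _) (by positivity) (by omega)
          _ = n := hqc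
    · rcases min_cases c (n / c) with ⟨h, _⟩ | ⟨h, _⟩ <;> rw [h]
      · omega
      · have : ¬(2 ∣ n / c) := hqodd
        omega
    · rcases min_cases c (n / c) with ⟨h, _⟩ | ⟨h, _⟩ <;> rw [h]
      · exact hcd
      · exact hq
  · rintro ⟨e, he3, heU, heodd, hed⟩
    refine ⟨e, he3, ?_, heodd, hed⟩
    have h3 : 3 * e ≤ n := by nlinarith
    omega

-- A's and B's primality tests agree on all n ≥ 3
theorem prime_eq (n : Int) (hn : 3 ≤ n) : isPrimeFuc n = altIsPrime n := by
  unfold isPrimeFuc altIsPrime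
  have hne2 : (n == 2) = false := by simp; omega
  rw [hne2]
  by_cases h2 : 2 ∣ n
  · have hb : (PySem.Int.mod n 2 == 0) = true := by
      simpa using (mod_pos_eq_zero_iff n 2 (by norm_num)).mpr h2
    have hne2' : (n == 2) = false := by simp; omega
    simp only [hb, Bool.or_true, if_true, if_neg (show ¬ n < 2 by omega), hne2',
      Bool.false_eq_true]
    simp
  · have hm : ¬(PySem.Int.mod n 2 = 0) := fun h => h2 ((mod_pos_eq_zero_iff n 2 (by norm_num)).mp h)
    have hn1 : (n == 1) = false := by simp; omega
    have hn0 : (n == 0) = false := by simp; omega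
    have hmb : (PySem.Int.mod n 2 == 0) = false := by simpa using hm
    rw [hn1, hn0, hmb]
    have hlt : ¬(n < 2) := by omega
    simp only [Bool.false_eq_true, if_false, Bool.or_self, hlt]
    rw [Bool.eq_iff_iff, isPrimeFucLoop_iff, altTrialDiv_iff n (n + 1).toNat 3 (by norm_num) (by omega)]
    constructor
    · intro hall e he3 hen heodd hmod
      have hdvd : e ∣ n := (mod_pos_eq_zero_iff n e (by omega)).mp hmod
      have : ∃ c : Int, 3 ≤ c ∧ c < n / 2 + 1 ∧ 2 ∣ c - 3 ∧ c ∣ n :=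
        (divisor_bridge n hn h2).mpr ⟨e, he3, hen, heodd, hdvd⟩
      rcases this with ⟨c, hc3, hcU, hcodd, hcd⟩
      have hmem : c ∈ PySem.List.pyRange 3 (n / 2 + 1) 2 :=
        (PySem.List.mem_pyRange_iff_of_pos (by norm_num) c).mpr ⟨hc3, hcU, hcodd⟩
      exact hall c hmem ((mod_pos_eq_zero_iff n c (by omega)).mpr hcd)
    · intro hall c hmem hmod
      rcases (PySem.List.mem_pyRange_iff_of_pos (by norm_num) c).mp hmem with ⟨hc3, hcU, hcodd⟩
      have hdvd : c ∣ n := (mod_pos_eq_zero_iff n c (by omega)).mp hmod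
      have : ∃ e : Int, 3 ≤ e ∧ e * e ≤ n ∧ 2 ∣ e - 3 ∧ e ∣ n :=
        (divisor_bridge n hn h2).mp ⟨c, hc3, hcU, hcodd, hdvd⟩
      rcases this with ⟨e, he3, heU, heodd, hed⟩
      exact hall e he3 heU heodd ((mod_pos_eq_zero_iff n e (by omega)).mpr hed)

-- common shape of both searches: try j = 0, 1, …, checking the pair (number - j, number + j)
def searchS (number : Int) : Nat → Int → String
  | 0, _ => ""
  | m + 1, j =>
    if altIsPrime (number - j) && altIsPrime (number + j) then
      PySem.Int.toStr (number - j) ++ " " ++ PySem.Int.toStr (number + j)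
    else searchS number m (j + 1)

theorem loopA_eq_searchS (number : Int) (hn : 3 ≤ number) :
    ∀ (m : Nat) (j : Int), 0 ≤ j → (number - j - 2).toNat = m →
      findPrimePairLoop number (PySem.List.pyRange (number - j) 2 (-1)) = searchS number m j := by
  intro m
  induction m with
  | zero =>
    intro j hj hm
    rw [PySem.List.pyRange_neg_one_eq_nil (by omega)]
    rfl
  | succ m ih =>
    intro j hj hm
    rw [PySem.List.pyRange_neg_one_cons (by omega)]
    have hij : number * 2 - (number - j) = number + j := by ring
    show (if isPrimeFuc (number - j) then _ else _) = _
    rw [hij, prime_eq (number - j) (by omega), prime_eq (number + j) (by omega)]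
    have hrec : number - j - 1 = number - (j + 1) := by ring
    rw [searchS]
    cases hp : altIsPrime (number - j) <;> cases hq : altIsPrime (number + j) <;>
      simp only [hp, hq, Bool.false_and, Bool.true_and, if_true, if_false,
        Bool.false_eq_true, Bool.true_eq_false] <;>
      rw [hrec] <;> exact ih (j + 1) (by omega) (by omega)

theorem loopB_eq_searchS (number : Int) (hn : 3 ≤ number) :
    ∀ (m : Nat) (j : Int), 0 ≤ j → (number - j - 2).toNat = m →
      altSearch (2 * number) (PySem.List.pyRange (number + j) (2 * number - 2) 1) = searchS number m j := by
  intro m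
  induction m with
  | zero =>
    intro j hj hm
    rw [PySem.List.pyRange_one_eq_nil (by omega)]
    rfl
  | succ m ih =>
    intro j hj hm
    rw [PySem.List.pyRange_one_cons (by omega)]
    have hq : 2 * number - (number + j) = number - j := by ring
    show (if altIsPrime (number + j) && altIsPrime (2 * number - (number + j)) then _ else _) = _
    rw [hq, searchS, Bool.and_comm]
    have hrec : number + j + 1 = number + (j + 1) := by ring
    cases hc : (altIsPrime (number - j) && altIsPrime (number + j)) <;>
      simp only [hc, if_true, if_false, Bool.false_eq_true, Bool.true_eq_false] <;>
      try rfl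
    rw [hrec]
    exact ih (j + 1) (by omega) (by omega)

-- ===== VERDICT (by name: the statement is the Claim_ definition above) =====
theorem findPrimePair_spec : Claim_equal_findPrimePair := by
  unfold Claim_equal_findPrimePair
  intro number _
  unfold Spec_findPrimePair findPrimePair findPrimePair_alt
  by_cases hn : 3 ≤ number
  · have hA := loopA_eq_searchS number hn (number - 2).toNat 0 (le_refl 0) (by omega)
    have hB := loopB_eq_searchS number hn (number - 2).toNat 0 (le_refl 0) (by omega)
    simp only [sub_zero, add_zero] at hA hB
    rw [hA, hB]
  · rw [PySem.List.pyRange_neg_one_eq_nil (by omega),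
      PySem.List.pyRange_one_eq_nil (by omega)]
    rfl
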